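-- pv_equiv track=rewrite | github.com/intuitive-robots/NILS | nils/annotator/keystate_predictors/gripper_position_predictor.py | get_seq_lens
-- ===== SOURCE A (Python) =====
-- def get_seq_lens(arr):
--     sequences = []
--     current_length = 0
--     inside_sequence = False
--
--     for num in arr:
--         if num == 1:
--             if inside_sequence:
--                 sequences.append(current_length)
--                 current_length = 0
--             inside_sequence = True
--         elif num == -1:
--             if inside_sequence:
--                 sequences.append(current_length)
--                 current_length = 0
--                 inside_sequence = False
--         elif num == 0:
--             if inside_sequence:
--                 current_length += 1
--
--     return sequences
-- ===== SOURCE B (Python) =====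
-- def get_seq_lens(arr):
--     xs = list(arr)
--     b = [i for i, v in enumerate(xs) if v == 1 or v == -1]
--     return [xs[i + 1:j].count(0) for i, j in zip(b, b[1:]) if xs[i] == 1]
-- ===== Notes on version B (the rewrite author's own statement) =====
-- stated objective: alternative
-- what changed: Replaces A's single-pass state machine (inside_sequence flag, running counter) by first collecting the indices of all boundary markers (1/-1) and then, for each consecutive index pair whose left marker is 1, counting the zeros in the slice between them.
import Mathlib
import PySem

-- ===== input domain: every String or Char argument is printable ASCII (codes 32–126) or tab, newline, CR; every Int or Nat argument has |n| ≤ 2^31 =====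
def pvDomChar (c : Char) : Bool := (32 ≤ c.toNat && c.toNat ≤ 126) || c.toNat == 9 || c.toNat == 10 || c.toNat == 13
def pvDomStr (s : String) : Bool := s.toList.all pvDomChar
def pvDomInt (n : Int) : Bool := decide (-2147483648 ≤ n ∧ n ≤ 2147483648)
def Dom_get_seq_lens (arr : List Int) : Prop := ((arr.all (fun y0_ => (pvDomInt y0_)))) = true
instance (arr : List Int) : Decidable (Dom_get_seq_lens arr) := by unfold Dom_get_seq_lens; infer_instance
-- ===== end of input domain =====

-- B re-derives the lengths from the list of boundary-marker indices (pairs of consecutive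
-- 1/-1 positions) instead of A's single-pass state machine; same O(n) cost, alternative algorithm.

-- ===== PORT A =====
-- one loop step of A: state = (sequences, current_length, inside_sequence)
def pvStepA (s : List Int × Int × Bool) (num : Int) : List Int × Int × Bool :=
  if num = 1 then
    if s.2.2 then (s.1 ++ [s.2.1], 0, true) else (s.1, s.2.1, true)
  else if num = -1 then
    if s.2.2 then (s.1 ++ [s.2.1], 0, false) else s
  else if num = 0 then
    if s.2.2 then (s.1, s.2.1 + 1, s.2.2) else s
  else s

def get_seq_lens (arr : List Int) : List Int :=
  (arr.foldl pvStepA ([], 0, false)).1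

-- ===== PORT B =====
def pvIsBoundary (v : Int) : Bool := v == 1 || v == -1

-- body of B's list comprehension: for a pair (i, j) of consecutive boundary indices,
-- emit xs[i+1:j].count(0) iff xs[i] == 1
def pvBodyB (xs : List Int) (p : Int × Int) : Option Int :=
  if PySem.List.pyGetD xs p.1 0 = 1 then
    some (((PySem.List.slice xs (some (p.1 + 1)) (some p.2)).count 0 : Int))
  else none

def get_seq_lens_alt (arr : List Int) : List Int :=
  let xs := arr
  let b := ((PySem.List.enumerate xs).filter (fun p => pvIsBoundary p.2)).map Prod.fst
  (b.zip (PySem.List.slice b (some 1) none)).filterMap (pvBodyB xs)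

-- ===== PRECONDITION & SPEC =====
def Spec_get_seq_lens (arr : List Int) (out : List Int) : Prop := out = get_seq_lens_alt arr
instance (arr : List Int) (out : List Int) : Decidable (Spec_get_seq_lens arr out) := by unfold Spec_get_seq_lens; infer_instance

-- ===== CLAIM (what is proved, stated in full; the proofs are below) =====
def Claim_equal_get_seq_lens : Prop := ∀ (arr : List Int), Dom_get_seq_lens arr → Spec_get_seq_lens arr (get_seq_lens arr)

-- ===== LEMMAS AND PROOFS =====

-- common recursive specification: f = "looking for an opening 1", g c = "inside, c zeros so far"
mutual
def pvF : List Int → List Int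
  | [] => []
  | x :: t => if x = 1 then pvG t 0 else pvF t
def pvG : List Int → Int → List Int
  | [], _ => []
  | x :: t, c =>
      if x = 1 then c :: pvG t 0
      else if x = -1 then c :: pvF t
      else if x = 0 then pvG t (c + 1)
      else pvG t c
end

-- Nat-level boundary-index list
def pvNB : List Int → List Nat
  | [] => []
  | x :: t => if pvIsBoundary x then 0 :: (pvNB t).map (· + 1) else (pvNB t).map (· + 1)

def pvNBody (xs : List Int) (p : Nat × Nat) : Option Int :=
  if xs.getD p.1 0 = 1 then
    some ((((xs.drop (p.1 + 1)).take (p.2 - (p.1 + 1))).count 0 : Int))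
  else none

def pvB (xs : List Int) : List Int :=
  ((pvNB xs).zip (pvNB xs).tail).filterMap (pvNBody xs)

def pvHasB (xs : List Int) : Bool := xs.any pvIsBoundary
def pvZ (xs : List Int) : Int := ((xs.takeWhile (fun v => !pvIsBoundary v)).count 0 : Int)

-- A's fold computes pvF / pvG
lemma pvA_loop (xs : List Int) :
    (∀ seqs : List Int, (xs.foldl pvStepA (seqs, 0, false)).1 = seqs ++ pvF xs) ∧
    (∀ (seqs : List Int) (c : Int), (xs.foldl pvStepA (seqs, c, true)).1 = seqs ++ pvG xs c) := by
  induction xs with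
  | nil => simp [pvF, pvG]
  | cons x t ih =>
    constructor
    · intro seqs
      by_cases h1 : x = 1
      · simp [h1, pvStepA, pvF, ih.2]
      · by_cases hm1 : x = -1
        · simp [h1, hm1, pvStepA, pvF, ih.1]
        · by_cases h0 : x = 0
          · simp [h1, hm1, h0, pvStepA, pvF, ih.1]
          · simp [h1, hm1, h0, pvStepA, pvF, ih.1]
    · intro seqs c
      by_cases h1 : x = 1
      · simp [h1, pvStepA, pvG, ih.2]
      · by_cases hm1 : x = -1
        · simp [h1, hm1, pvStepA, pvG, ih.1]
        · by_cases h0 : x = 0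
          · simp [h1, hm1, h0, pvStepA, pvG, ih.2]
          · simp [h1, hm1, h0, pvStepA, pvG, ih.2]

lemma pvA_eq_F (arr : List Int) : get_seq_lens arr = pvF arr := by
  simpa [get_seq_lens] using (pvA_loop arr).1 []

-- enumerate-based boundary list = Nat-level one, shifted by the start
lemma pvHasB_cons (x : Int) (t : List Int) :
    pvHasB (x :: t) = (pvIsBoundary x || pvHasB t) := by
  simp [pvHasB]

-- enumerate-based boundary list = Nat-level one, shifted by the start
lemma pvBnd_eq (xs : List Int) : ∀ s : Nat,
    ((PySem.List.enumerate xs (s : Int)).filter (fun p => pvIsBoundary p.2)).map Prod.fst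
      = (pvNB xs).map (fun n => ((n + s : Nat) : Int)) := by
  induction xs with
  | nil => intro s; simp [PySem.List.enumerate_nil, pvNB]
  | cons x t ih =>
    intro s
    have hcast : ((s : Int) + 1) = ((s + 1 : Nat) : Int) := by push_cast; ring
    rw [PySem.List.enumerate_cons, List.filter_cons, hcast]
    by_cases hb : pvIsBoundary x = true
    · rw [show pvNB (x :: t) = 0 :: (pvNB t).map (· + 1) from by simp [pvNB, hb]]
      simp only [hb, if_true, List.map_cons, List.map_map, ih (s + 1)]
      congr 1
      · norm_num
      · apply List.map_congr_left; intro n _; simp only [Function.comp_apply]; congr 1; omega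
    · rw [show pvNB (x :: t) = (pvNB t).map (· + 1) from by simp [pvNB, hb]]
      simp only [hb, if_false, Bool.false_eq_true, List.map_map, ih (s + 1)]
      apply List.map_congr_left; intro n _; simp only [Function.comp_apply]; congr 1; omega

lemma pvBnd_zero (xs : List Int) :
    ((PySem.List.enumerate xs 0).filter (fun p => pvIsBoundary p.2)).map Prod.fst
      = (pvNB xs).map (fun n : Nat => (n : Int)) := by
  have h := pvBnd_eq xs 0
  rw [Nat.cast_zero] at h
  rw [h]
  apply List.map_congr_left; intro n _; norm_num

-- the cast body agrees with the Nat-level body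
lemma pvBodyB_cast (xs : List Int) (p : Nat × Nat) :
    pvBodyB xs (((p.1 : Nat) : Int), ((p.2 : Nat) : Int)) = pvNBody xs p := by
  have h1 : ((p.1 : Int) + 1) = ((p.1 + 1 : Nat) : Int) := by push_cast; ring
  simp only [pvBodyB, pvNBody]
  rw [h1, PySem.List.slice_natCast, PySem.List.pyGetD_natCast]

lemma pvAlt_eq_B (arr : List Int) : get_seq_lens_alt arr = pvB arr := by
  simp only [get_seq_lens_alt, pvB]
  rw [pvBnd_zero, PySem.List.slice_from_one]
  have htail : (List.map (fun n : Nat => (n : Int)) (pvNB arr)).tail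
      = List.map (fun n : Nat => (n : Int)) (pvNB arr).tail := by
    cases pvNB arr <;> simp
  have hfun : (pvBodyB arr ∘ Prod.map (fun n : Nat => (n : Int)) (fun n : Nat => (n : Int)))
      = pvNBody arr := by
    funext p
    obtain ⟨i, j⟩ := p
    simpa [Prod.map] using pvBodyB_cast arr (i, j)
  rw [htail, List.zip_map, List.filterMap_map, hfun]

lemma pvNBody_shift (x : Int) (xs : List Int) (p : Nat × Nat) :
    pvNBody (x :: xs) (p.1 + 1, p.2 + 1) = pvNBody xs p := by
  have : p.2 + 1 - (p.1 + 1 + 1) = p.2 - (p.1 + 1) := by omega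
  simp [pvNBody, this]

lemma pvNB_nil_iff (xs : List Int) : pvNB xs = [] ↔ pvHasB xs = false := by
  induction xs with
  | nil => simp [pvNB, pvHasB]
  | cons x t ih =>
    by_cases hb : pvIsBoundary x = true
    · simp [pvNB, hb, pvHasB_cons]
    · simp [pvNB, hb, pvHasB_cons, ih]

lemma pvF_no_boundary (xs : List Int) (h : pvHasB xs = false) : pvF xs = [] := by
  induction xs with
  | nil => simp [pvF]
  | cons x t ih =>
    rw [pvHasB_cons, Bool.or_eq_false_iff] at h
    have hx1 : x ≠ 1 := by intro e; subst e; simp [pvIsBoundary] at h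
    simp [pvF, hx1, ih h.2]

lemma pvNB_head_take (xs : List Int) : ∀ i0 rest, pvNB xs = i0 :: rest →
    xs.take i0 = xs.takeWhile (fun v => !pvIsBoundary v) := by
  induction xs with
  | nil => intro i0 rest h; simp [pvNB] at h
  | cons x t ih =>
    intro i0 rest h
    by_cases hb : pvIsBoundary x = true
    · simp [pvNB, hb] at h
      simp [← h.1, hb, List.takeWhile_cons]
    · simp [pvNB, hb] at h
      cases hN : pvNB t with
      | nil => rw [hN] at h; simp at h
      | cons j0 r =>
        rw [hN] at h; simp at h
        have hi : i0 = j0 + 1 := h.1.symm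
        simp [hi, List.takeWhile_cons, hb, ih j0 r hN]

-- the main invariant: pvB computes pvF, and pvG is characterized by the first boundary
lemma pvMain (xs : List Int) :
    pvB xs = pvF xs ∧
    (∀ c : Int, pvG xs c = if pvHasB xs then (c + pvZ xs) :: pvF xs else []) := by
  induction xs with
  | nil => simp [pvB, pvNB, pvF, pvG, pvHasB]
  | cons x t ih =>
    have hshift : pvB (x :: t)
        = ((pvNB (x :: t)).zip (pvNB (x :: t)).tail).filterMap (pvNBody (x :: t)) := rfl
    have hmapzip : ∀ l : List Nat,
        ((l.map (· + 1)).zip (l.map (· + 1)).tail).filterMap (pvNBody (x :: t))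
          = (l.zip l.tail).filterMap (pvNBody t) := by
      intro l
      rw [← List.map_tail, List.zip_map, List.filterMap_map]
      congr 1
      funext p
      simpa using pvNBody_shift x t (p.1, p.2)
    by_cases hb : pvIsBoundary x = true
    · have hx : x = 1 ∨ x = -1 := by
        simp [pvIsBoundary] at hb; tauto
      cases hN : pvNB t with
      | nil =>
        have hnob : pvHasB t = false := (pvNB_nil_iff t).mp hN
        have hF : pvF t = [] := pvF_no_boundary t hnob
        have hBB : pvB (x :: t) = [] := by
          simp [pvB, pvNB, hb, hN]
        have hHB : pvHasB (x :: t) = true := by simp [pvHasB_cons, hb]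
        have hZ : pvZ (x :: t) = 0 := by simp [pvZ, List.takeWhile_cons, hb]
        rcases hx with rfl | rfl
        · exact ⟨by rw [hBB]; simp [pvF, ih.2 0, hnob],
            fun c => by simp [pvG, hHB, hZ, pvF, ih.2 0, hnob]⟩
        · exact ⟨by rw [hBB]; simp [pvF, hF],
            fun c => by simp [pvG, hHB, hZ, pvF, hF]⟩
      | cons i0 rest =>
        have hHBt : pvHasB t = true := by
          by_contra hc
          simp only [Bool.not_eq_true] at hc
          rw [(pvNB_nil_iff t).mpr hc] at hN; simp at hN
        have htake : t.take i0 = t.takeWhile (fun v => !pvIsBoundary v) :=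
          pvNB_head_take t i0 rest hN
        have hcount : pvNBody (x :: t) (0, i0 + 1)
            = if x = 1 then some (pvZ t) else none := by
          simp [pvNBody, pvZ, htake.symm]
        have hBB : pvB (x :: t)
            = (if x = 1 then some (pvZ t) else none).toList ++ pvB t := by
          rw [hshift]
          have hnb : pvNB (x :: t) = 0 :: (i0 + 1) :: (rest.map (· + 1)) := by
            simp [pvNB, hb, hN]
          rw [hnb]
          have hzip : ((0 : Nat) :: (i0 + 1) :: rest.map (· + 1)).zip
              (((0 : Nat) :: (i0 + 1) :: rest.map (· + 1)).tail)
              = (0, i0 + 1) :: (((i0 :: rest).map (· + 1)).zip ((i0 :: rest).map (· + 1)).tail) := by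
            simp [List.zip]
          rw [hzip, List.filterMap_cons, hcount, hmapzip (i0 :: rest)]
          by_cases h1 : x = 1 <;> simp [h1, pvB, hN]
        have hHB : pvHasB (x :: t) = true := by simp [pvHasB_cons, hb]
        have hZ : pvZ (x :: t) = 0 := by simp [pvZ, List.takeWhile_cons, hb]
        rcases hx with rfl | rfl
        · exact ⟨by rw [hBB]; simp [pvF, ih.2 0, hHBt, ih.1],
            fun c => by simp [pvG, hHB, hZ, pvF, ih.2 0, hHBt]⟩
        · refine ⟨by rw [hBB]; simp [pvF, ih.1], fun c => ?_⟩
          simp [pvG, hHB, hZ, pvF]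
    · have hNB : pvNB (x :: t) = (pvNB t).map (· + 1) := by simp [pvNB, hb]
      have hBB : pvB (x :: t) = pvB t := by
        rw [hshift, hNB, hmapzip (pvNB t)]; rfl
      have hbf : pvIsBoundary x = false := by
        revert hb; cases pvIsBoundary x <;> simp
      have hx1 : x ≠ 1 := by rintro rfl; simp [pvIsBoundary] at hbf
      have hxm1 : x ≠ -1 := by rintro rfl; simp [pvIsBoundary] at hbf
      have hF : pvF (x :: t) = pvF t := by simp [pvF, hx1]
      have hHB : pvHasB (x :: t) = pvHasB t := by simp [pvHasB_cons, hbf]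
      refine ⟨by rw [hBB, hF, ih.1], fun c => ?_⟩
      by_cases h0 : x = 0
      · subst h0
        have hZ : pvZ ((0 : Int) :: t) = 1 + pvZ t := by
          simp [pvZ, List.takeWhile_cons, hbf, List.count_cons]
          push_cast; ring
        have hGc : pvG ((0 : Int) :: t) c = pvG t (c + 1) := by
          simp [pvG]
        rw [hGc, ih.2 (c + 1), ← hHB, hZ, hF]
        have harith : c + (1 + pvZ t) = c + 1 + pvZ t := by ring
        rw [harith]
      · have hZ : pvZ (x :: t) = pvZ t := by
          simp [pvZ, List.takeWhile_cons, hbf, List.count_cons, h0]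
        have hGc : pvG (x :: t) c = pvG t c := by
          simp [pvG, hx1, hxm1, h0]
        rw [hGc, ih.2 c, ← hHB, hZ, hF]

-- ===== VERDICT (by name: the statement is the Claim_ definition above) =====
theorem get_seq_lens_spec : Claim_equal_get_seq_lens := by
  intro arr _
  show get_seq_lens arr = get_seq_lens_alt arr
  rw [pvA_eq_F, pvAlt_eq_B, (pvMain arr).1]
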